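-- pv_equiv track=rewrite | github.com/jesuslovesyoutoday/vm_lab | 2_5/5.py | make_n
-- ===== SOURCE A (Python) =====
-- def make_n(r):
--     data = [[1, 2]]
--     k = 0
--     for j in range(2, r+1):
--         n = []
--         for i in data[k]:
--             n.append(i)
--             n.append(pow(2, j) + 1 - i)
--             i+=1
--         k += 1
--         data.append(n)
--     return data[len(data)-1]
-- ===== SOURCE B (Python) =====
-- def make_n(r):
--     if r < 2:
--         return [1, 2]
--     prev = make_n(r - 1)
--     out = []
--     for i in prev:
--         out.append(i)
--         out.append(pow(2, r) + 1 - i)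
--     return out
-- ===== Notes on version B (the rewrite author's own statement) =====
-- stated objective: simpler
-- what changed: B replaces A's outer loop that accumulates every intermediate level in a growing list-of-lists (indexed by a counter k) with a direct recursion on r that keeps only the previous level.
import Mathlib
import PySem

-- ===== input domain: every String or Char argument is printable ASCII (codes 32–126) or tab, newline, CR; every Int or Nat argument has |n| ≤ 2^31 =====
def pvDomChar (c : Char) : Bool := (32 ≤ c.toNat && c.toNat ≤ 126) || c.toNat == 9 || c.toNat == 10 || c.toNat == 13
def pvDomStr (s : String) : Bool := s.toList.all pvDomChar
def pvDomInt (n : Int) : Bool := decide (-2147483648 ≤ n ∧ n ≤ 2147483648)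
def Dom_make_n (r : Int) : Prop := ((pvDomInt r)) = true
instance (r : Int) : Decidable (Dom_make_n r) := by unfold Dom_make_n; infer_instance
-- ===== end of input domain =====

-- B replaces A's outer loop that accumulates every intermediate level in a growing
-- list-of-lists with a direct recursion on r keeping only the previous level (objective: simpler).

-- ===== PORT A =====
-- inner loop body: n.append(i); n.append(pow(2, j) + 1 - i)  (the trailing 'i+=1' is a
-- no-op: the loop variable is rebound at each iteration)
def makeLevel (j : Int) (prev : List Int) : List Int :=
  prev.foldl (fun acc i => (acc ++ [i]) ++ [2 ^ j.toNat + 1 - i]) []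

-- one iteration of the outer loop over j: data.append(n); k += 1  (data[k] never raises)
def stepA (st : List (List Int) × Int) (j : Int) : List (List Int) × Int :=
  (st.1 ++ [makeLevel j (PySem.List.pyGetD st.1 st.2 [])], st.2 + 1)

def make_n (r : Int) : List Int :=
  let st := (PySem.List.pyRange 2 (r + 1) 1).foldl stepA ([[1, 2]], 0)
  PySem.List.pyGetD st.1 ((st.1.length : Int) - 1) []

-- ===== PORT B =====
def make_n_alt (r : Int) : List Int :=
  if r < 2 then [1, 2]
  else (make_n_alt (r - 1)).foldl (fun acc i => (acc ++ [i]) ++ [2 ^ r.toNat + 1 - i]) []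
termination_by r.toNat
decreasing_by simp only [not_lt] at *; omega

-- ===== PRECONDITION & SPEC =====
def Spec_make_n (r : Int) (out : List Int) : Prop := out = make_n_alt r
instance (r : Int) (out : List Int) : Decidable (Spec_make_n r out) := by unfold Spec_make_n; infer_instance

-- ===== CLAIM (what is proved, stated in full; the proofs are below) =====
def Claim_equal_make_n : Prop := ∀ (r : Int), Dom_make_n r → Spec_make_n r (make_n r)

-- ===== LEMMAS AND PROOFS =====

-- the list A's `data` holds after n outer iterations
def levels : Nat → List (List Int)
  | 0 => [[1, 2]]
  | n + 1 => levels n ++ [make_n_alt ((n : Int) + 2)]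

theorem length_levels (n : Nat) : (levels n).length = n + 1 := by
  induction n with
  | zero => rfl
  | succ n ih => simp [levels, ih]

theorem getD_levels_last (n : Nat) :
    (levels n).getD n [] = make_n_alt ((n : Int) + 1) := by
  cases n with
  | zero =>
      simp [levels]
      rw [make_n_alt]
      norm_num
  | succ n =>
      have h := length_levels n
      simp [levels, List.getD, h]
      have h2 : (n : Int) + 1 + 1 = (n : Int) + 2 := by ring
      rw [h2]

theorem makeLevel_eq (j : Int) (prev : List Int) :
    makeLevel j prev = prev.foldl (fun acc i => (acc ++ [i]) ++ [2 ^ j.toNat + 1 - i]) [] := rfl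

theorem make_n_alt_step (n : Nat) :
    make_n_alt ((n : Int) + 2) =
      (make_n_alt ((n : Int) + 1)).foldl
        (fun acc i => (acc ++ [i]) ++ [2 ^ (((n : Int) + 2)).toNat + 1 - i]) [] := by
  have h : ¬ ((n : Int) + 2 < 2) := by omega
  have h2 : (n : Int) + 2 - 1 = (n : Int) + 1 := by ring
  rw [make_n_alt, if_neg h, h2]

theorem foldA_eq (n : Nat) :
    (PySem.List.pyRange 2 ((n : Int) + 2) 1).foldl stepA ([[1, 2]], 0) =
      (levels n, (n : Int)) := by
  induction n with
  | zero =>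
      have h0 : PySem.List.pyRange 2 (((0 : Nat) : Int) + 2) 1 = [] := by
        apply PySem.List.pyRange_one_eq_nil; omega
      rw [h0]
      simp [levels]
  | succ n ih =>
      push_cast
      have hsplit : PySem.List.pyRange 2 ((n : Int) + 1 + 2) 1 =
          PySem.List.pyRange 2 ((n : Int) + 2) 1 ++ [(n : Int) + 2] := by
        have h3 : (n : Int) + 1 + 2 = ((n : Int) + 2) + 1 := by ring
        rw [h3]
        exact PySem.List.pyRange_one_succ_right (by omega)
      rw [hsplit, List.foldl_append, ih]
      show stepA (levels n, (n : Int)) ((n : Int) + 2) = (levels (n + 1), (n : Int) + 1)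
      unfold stepA
      rw [PySem.List.pyGetD_natCast, getD_levels_last, makeLevel_eq, ← make_n_alt_step]
      simp [levels]

theorem make_n_eq (r : Int) : make_n r = make_n_alt r := by
  by_cases h : r < 2
  · have hnil : PySem.List.pyRange 2 (r + 1) 1 = [] := by
      apply PySem.List.pyRange_one_eq_nil; omega
    rw [make_n_alt]
    simp [make_n, hnil, h, PySem.List.pyGetD]
  · -- r ≥ 2: write r = n + 2
    obtain ⟨n, hn⟩ : ∃ n : Nat, r = (n : Int) + 2 := ⟨(r - 2).toNat, by omega⟩
    subst hn
    unfold make_n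
    have hr1 : (n : Int) + 2 + 1 = (((n + 1 : Nat)) : Int) + 2 := by push_cast; ring
    rw [hr1, foldA_eq (n + 1)]
    have hlen := length_levels (n + 1)
    simp only [hlen]
    have : ((n + 1 + 1 : Nat) : Int) - 1 = ((n + 1 : Nat) : Int) := by push_cast; ring
    rw [this, PySem.List.pyGetD_natCast, getD_levels_last]
    push_cast; ring_nf

-- ===== VERDICT (by name: the statement is the Claim_ definition above) =====
theorem make_n_spec : Claim_equal_make_n := by
  intro r _
  unfold Spec_make_n
  exact make_n_eq r
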